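-- pv_equiv track=rewrite | github.com/seanli9604/subformula_graph | subformula-graphs/visualisation.py | cluster
-- ===== SOURCE A (Python) =====
-- def cluster(l, clustersize): #cluster continguous elements of a list e.g [1,2,4,5] -> [[1,2], [4,5]] if clustersize = 1
--     res = [[l[0]]]
--     for i in l[1:]:
--         if i < res[-1][-1] + clustersize:
--             res[-1].append(i)
--         else:
--             res.append([i])
--     return res
-- ===== SOURCE B (Python) =====
-- def cluster(l, clustersize):
--     # two passes: find the indices where a new cluster starts, then slice between them
--     starts = [i for i in range(1, len(l)) if l[i] >= l[i - 1] + clustersize]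
--     bounds = [0] + starts + [len(l)]
--     return [l[a:b] for a, b in zip(bounds, bounds[1:])]
-- ===== Notes on version B (the rewrite author's own statement) =====
-- stated objective: alternative
-- what changed: Replaced the single-pass append-to-last-cluster fold by a two-pass boundary computation: first collect the split indices i where l[i] >= l[i-1] + clustersize, then build the clusters by slicing l between consecutive boundaries.
import Mathlib
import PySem

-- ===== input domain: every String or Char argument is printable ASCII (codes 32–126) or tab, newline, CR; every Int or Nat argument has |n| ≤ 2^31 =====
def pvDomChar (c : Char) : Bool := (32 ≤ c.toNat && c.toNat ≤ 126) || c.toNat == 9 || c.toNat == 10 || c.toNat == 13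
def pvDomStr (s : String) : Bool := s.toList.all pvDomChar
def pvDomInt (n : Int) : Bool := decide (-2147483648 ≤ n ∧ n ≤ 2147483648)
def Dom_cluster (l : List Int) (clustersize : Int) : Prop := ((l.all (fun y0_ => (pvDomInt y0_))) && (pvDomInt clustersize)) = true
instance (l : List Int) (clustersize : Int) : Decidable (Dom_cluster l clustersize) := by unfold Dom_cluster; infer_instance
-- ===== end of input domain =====

-- B replaces A's single-pass append-to-last-cluster loop by a two-pass split-indices-then-slice decomposition (alternative, same cost).


-- ===== PORT A =====
-- loop body: 'if i < res[-1][-1] + clustersize: res[-1].append(i) else: res.append([i])'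
-- (res[-1].append(i) on an immutable list is dropLast ++ [last ++ [i]])
def clusterStepA (clustersize : Int) (res : List (List Int)) (i : Int) : List (List Int) :=
  if i < PySem.List.pyGetD (PySem.List.pyGetD res (-1) []) (-1) 0 + clustersize then
    res.dropLast ++ [PySem.List.pyGetD res (-1) [] ++ [i]]
  else
    res ++ [[i]]

def cluster (l : List Int) (clustersize : Int) : List (List Int) :=
  match l with
  | [] => []   -- Python raises IndexError on l[0] here; excluded by Pre_cluster
  | x :: rest =>   -- res = [[l[0]]]; 'for i in l[1:]' iterates over rest
    rest.foldl (clusterStepA clustersize) [[x]]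

-- ===== PORT B =====
-- starts = [i for i in range(1, len(l)) if l[i] >= l[i-1] + clustersize]
-- bounds = [0] + starts + [len(l)]
-- return [l[a:b] for a, b in zip(bounds, bounds[1:])]
def cluster_alt (l : List Int) (clustersize : Int) : List (List Int) :=
  let n : Int := l.length
  let starts := (PySem.List.pyRange 1 n 1).filter
    (fun i => decide (PySem.List.pyGetD l i 0 ≥ PySem.List.pyGetD l (i - 1) 0 + clustersize))
  let bounds := 0 :: (starts ++ [n])
  (bounds.zip bounds.tail).map (fun p => PySem.List.slice l (some p.1) (some p.2))

-- ===== PRECONDITION & SPEC =====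
-- Python A indexes l[0] before the loop, so it raises IndexError on the empty list.
def Pre_cluster (l : List Int) (clustersize : Int) : Prop := l ≠ []
instance (l : List Int) (clustersize : Int) : Decidable (Pre_cluster l clustersize) := by unfold Pre_cluster; infer_instance
def pvWitness_cluster : List Int × Int := ([1, 2, 4, 5], 1)

def Spec_cluster (l : List Int) (clustersize : Int) (out : List (List Int)) : Prop := out = cluster_alt l clustersize
instance (l : List Int) (clustersize : Int) (out : List (List Int)) : Decidable (Spec_cluster l clustersize out) := by unfold Spec_cluster; infer_instance

-- ===== CLAIM (what is proved, stated in full; the proofs are below) =====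
def Claim_equal_cluster : Prop := ∀ (l : List Int) (clustersize : Int), Dom_cluster l clustersize → Pre_cluster l clustersize → Spec_cluster l clustersize (cluster l clustersize)

-- ===== LEMMAS AND PROOFS =====

-- Common reference: the clustering of x :: ys, built front-to-back by structural recursion.
def refCluster (cs : Int) (x : Int) : List Int → List (List Int)
  | [] => [[x]]
  | y :: ys =>
    if y < x + cs then
      match refCluster cs y ys with
      | [] => []          -- unreachable: refCluster is never []
      | h :: t => (x :: h) :: t
    else
      [x] :: refCluster cs y ys

lemma refCluster_ne_nil (cs x : Int) (ys : List Int) : refCluster cs x ys ≠ [] := by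
  cases ys with
  | nil => simp [refCluster]
  | cons y ys =>
    simp only [refCluster]
    split
    · cases h : refCluster cs y ys with
      | nil => exact absurd h (refCluster_ne_nil cs y ys)
      | cons a t => simp
    · simp

-- ---- A side: the fold computes refCluster ----
lemma foldA (cs : Int) : ∀ (ys : List Int) (x : Int) (c : List Int) (res : List (List Int)),
    ys.foldl (clusterStepA cs) (res ++ [c ++ [x]]) =
      res ++ ((c ++ (refCluster cs x ys).headD []) :: (refCluster cs x ys).tail) := by
  intro ys
  induction ys with
  | nil => intro x c res; simp [refCluster]
  | cons y ys ih =>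
    intro x c res
    obtain ⟨h, t, hr⟩ : ∃ h t, refCluster cs y ys = h :: t := by
      cases hr : refCluster cs y ys with
      | nil => exact absurd hr (refCluster_ne_nil cs y ys)
      | cons a t => exact ⟨a, t, rfl⟩
    have hlast : PySem.List.pyGetD (res ++ [c ++ [x]]) (-1) ([] : List Int) = c ++ [x] :=
      PySem.List.pyGetD_neg_one_append_singleton ..
    have hlast2 : PySem.List.pyGetD (c ++ [x]) (-1) (0 : Int) = x :=
      PySem.List.pyGetD_neg_one_append_singleton ..
    simp only [List.foldl_cons]
    by_cases hy : y < x + cs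
    · have hstep : clusterStepA cs (res ++ [c ++ [x]]) y = res ++ [(c ++ [x]) ++ [y]] := by
        simp [clusterStepA, hlast, hlast2, hy]
      rw [hstep, ih y (c ++ [x]) res]
      simp [refCluster, hy, hr]
    · have hstep : clusterStepA cs (res ++ [c ++ [x]]) y = (res ++ [c ++ [x]]) ++ [[] ++ [y]] := by
        simp [clusterStepA, hlast, hlast2, hy]
      rw [hstep, ih y [] (res ++ [c ++ [x]])]
      simp [refCluster, hy, hr]

lemma cluster_eq_ref (cs x : Int) (rest : List Int) :
    cluster (x :: rest) cs = refCluster cs x rest := by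
  have := foldA cs rest x [] []
  obtain ⟨h, t, hr⟩ : ∃ h t, refCluster cs x rest = h :: t := by
    cases hr : refCluster cs x rest with
    | nil => exact absurd hr (refCluster_ne_nil cs x rest)
    | cons a t => exact ⟨a, t, rfl⟩
  simpa [cluster, hr] using this

-- ---- B side ----
def startsOf (cs : Int) (l : List Int) : List Int :=
  (PySem.List.pyRange 1 (l.length : Int) 1).filter
    (fun i => decide (PySem.List.pyGetD l i 0 ≥ PySem.List.pyGetD l (i - 1) 0 + cs))

def mkOut (l : List Int) (bs : List Int) : List (List Int) :=
  (bs.zip bs.tail).map (fun p => PySem.List.slice l (some p.1) (some p.2))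

lemma cluster_alt_eq_mkOut (l : List Int) (cs : Int) :
    cluster_alt l cs = mkOut l (0 :: (startsOf cs l ++ [(l.length : Int)])) := rfl

lemma mkOut_cons (l : List Int) (a b : Int) (bs : List Int) :
    mkOut l (a :: b :: bs) = PySem.List.slice l (some a) (some b) :: mkOut l (b :: bs) := rfl

lemma pyGetD_cons_of_pos (x : Int) (t : List Int) (i : Int) (d : Int) (h1 : 1 ≤ i) :
    PySem.List.pyGetD (x :: t) i d = PySem.List.pyGetD t (i - 1) d := by
  obtain ⟨n, rfl⟩ : ∃ n : Nat, i = (n : Int) + 1 := ⟨(i - 1).toNat, by omega⟩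
  have h2 : ((n : Int) + 1) - 1 = (n : Int) := by ring
  rw [h2]
  simp [PySem.List.pyGetD, PySem.List.pyGet?_cons_succ]

lemma startsOf_cons (cs x y : Int) (r : List Int) :
    startsOf cs (x :: y :: r) =
      (if y ≥ x + cs then [1] else []) ++ (startsOf cs (y :: r)).map (· + 1) := by
  have hm : (1 : Int) ≤ ((y :: r).length : Int) := by simp
  have hlen : ((x :: y :: r).length : Int) = ((y :: r).length : Int) + 1 := by
    simp
  unfold startsOf
  rw [hlen]
  set m : Int := ((y :: r).length : Int) with hmdef
  rw [PySem.List.pyRange_one_cons (by omega : (1:Int) < m + 1)]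
  have hrange : PySem.List.pyRange (1 + 1) (m + 1) 1 = (PySem.List.pyRange 1 m 1).map (· + 1) := by
    rw [PySem.List.pyRange_one, PySem.List.pyRange_one]
    have he : (m + 1 - (1 + 1)).toNat = (m - 1).toNat := by omega
    rw [he, List.map_map]
    exact List.map_congr_left (fun k _ => by simp; ring)
  rw [List.filter_cons, hrange, List.filter_map]
  have e1 : PySem.List.pyGetD (x :: y :: r) 1 0 = y := by
    rw [pyGetD_cons_of_pos x (y :: r) 1 0 (by omega)]
    norm_num [PySem.List.pyGetD_zero_cons]
  have e0 : PySem.List.pyGetD (x :: y :: r) (1 - 1) 0 = x := by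
    norm_num [PySem.List.pyGetD_zero_cons]
  rw [e1, e0]
  have hfilter : List.filter ((fun i => decide (PySem.List.pyGetD (x :: y :: r) i 0 ≥ PySem.List.pyGetD (x :: y :: r) (i - 1) 0 + cs)) ∘ (· + 1)) (PySem.List.pyRange 1 m 1)
      = List.filter (fun i => decide (PySem.List.pyGetD (y :: r) i 0 ≥ PySem.List.pyGetD (y :: r) (i - 1) 0 + cs)) (PySem.List.pyRange 1 m 1) := by
    apply List.filter_congr
    intro i hi
    have hib : 1 ≤ i := (PySem.List.mem_pyRange_one.1 hi).1
    simp only [Function.comp]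
    have g1 : PySem.List.pyGetD (x :: y :: r) (i + 1) 0 = PySem.List.pyGetD (y :: r) i 0 := by
      rw [pyGetD_cons_of_pos x (y :: r) (i + 1) 0 (by omega)]; norm_num
    have g2 : PySem.List.pyGetD (x :: y :: r) (i + 1 - 1) 0 = PySem.List.pyGetD (y :: r) (i - 1) 0 := by
      have hi1 : i + 1 - 1 = i := by ring
      rw [hi1, pyGetD_cons_of_pos x (y :: r) i 0 hib]
    rw [g1, g2]
  rw [hfilter]
  by_cases hxy : y ≥ x + cs <;> simp [hxy]

lemma startsOf_nonneg (cs : Int) (l : List Int) : ∀ i ∈ startsOf cs l, 1 ≤ i := by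
  intro i hi
  exact (PySem.List.mem_pyRange_one.1 (List.mem_filter.1 hi).1).1

lemma slice_shift (x : Int) (t : List Int) (a b : Int) (ha : 0 ≤ a) (hb : 0 ≤ b) :
    PySem.List.slice (x :: t) (some (a + 1)) (some (b + 1)) = PySem.List.slice t (some a) (some b) := by
  rw [PySem.List.slice_toNat _ (by omega) (by omega), PySem.List.slice_toNat _ ha hb]
  have h1 : (a + 1).toNat = a.toNat + 1 := by omega
  have h2 : (b + 1).toNat = b.toNat + 1 := by omega
  rw [h1, h2, List.drop_succ_cons, Nat.succ_sub_succ]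

lemma mkOut_shift (x : Int) (t : List Int) (bs : List Int) (h : ∀ b ∈ bs, 0 ≤ b) :
    mkOut (x :: t) (bs.map (· + 1)) = mkOut t bs := by
  unfold mkOut
  rw [← List.map_tail, List.zip_map, List.map_map]
  apply List.map_congr_left
  intro p hp
  have h1 : p.1 ∈ bs := (List.of_mem_zip hp).1
  have h2 : p.2 ∈ bs.tail := (List.of_mem_zip hp).2
  obtain ⟨a, b⟩ := p
  exact slice_shift x t a b (h _ h1) (h _ (List.mem_of_mem_tail h2))

lemma slice_zero_cons (x : Int) (t : List Int) (b : Int) (hb : 0 ≤ b) :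
    PySem.List.slice (x :: t) (some 0) (some (b + 1)) =
      x :: PySem.List.slice t (some 0) (some b) := by
  rw [PySem.List.slice_toNat _ (by omega) (by omega), PySem.List.slice_toNat _ (by omega) hb]
  have h2 : (b + 1).toNat = b.toNat + 1 := by omega
  simp [h2]

lemma cluster_alt_eq_ref (cs : Int) : ∀ (t : List Int) (x : Int),
    cluster_alt (x :: t) cs = refCluster cs x t := by
  intro t
  induction t with
  | nil =>
    intro x
    rw [cluster_alt_eq_mkOut]
    have hs : startsOf cs [x] = [] := by
      unfold startsOf
      rw [PySem.List.pyRange_one_eq_nil (by simp)]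
      rfl
    rw [hs]
    simp [mkOut, refCluster, PySem.List.slice_toNat _ (by omega : (0:Int) ≤ 0) (by omega : (0:Int) ≤ 1)]
  | cons y r ih =>
    intro x
    rw [cluster_alt_eq_mkOut, startsOf_cons]
    have hlen : ((x :: y :: r).length : Int) = ((y :: r).length : Int) + 1 := by simp
    rw [hlen]
    set m : Int := ((y :: r).length : Int) with hmdef
    set bs : List Int := startsOf cs (y :: r) ++ [m] with hbsdef
    have hbs : ∀ b ∈ bs, 0 ≤ b := by
      intro b hb
      rcases List.mem_append.1 hb with h | h
      · have := startsOf_nonneg cs (y :: r) b h; omega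
      · simp at h; simp only [h, hmdef]; positivity
    have hmapbs : (startsOf cs (y :: r)).map (· + 1) ++ [m + 1] = bs.map (· + 1) := by
      simp [hbsdef]
    have hB : refCluster cs y r = mkOut (y :: r) (0 :: bs) := by
      rw [← ih y, cluster_alt_eq_mkOut]
    obtain ⟨b1, bs', hbsc⟩ : ∃ b1 bs', bs = b1 :: bs' := by
      cases hbc : bs with
      | nil => rw [hbsdef] at hbc; simp at hbc
      | cons a u => exact ⟨a, u, rfl⟩
    have hb1 : 0 ≤ b1 := hbs b1 (by rw [hbsc]; simp)
    by_cases hy : y < x + cs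
    · -- no split at index 1: x joins the first cluster of the tail
      rw [if_neg (by omega), List.nil_append, hmapbs, hbsc]
      simp only [List.map_cons]
      rw [mkOut_cons, refCluster, if_pos hy, hB, hbsc, mkOut_cons]
      have hshift : mkOut (x :: y :: r) ((b1 :: bs').map (· + 1)) = mkOut (y :: r) (b1 :: bs') := by
        rw [← hbsc]; exact mkOut_shift x (y :: r) bs hbs
      simp only [List.map_cons] at hshift
      rw [hshift, slice_zero_cons x (y :: r) b1 hb1]
    · -- a split at index 1: [x] becomes its own cluster
      rw [if_pos (by omega), refCluster, if_neg hy, hB, hbsc]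
      simp only [List.cons_append, List.nil_append, hmapbs, hbsc, List.map_cons]
      rw [mkOut_cons]
      have hone : PySem.List.slice (x :: y :: r) (some 0) (some 1) = [x] := by
        rw [PySem.List.slice_toNat _ (by omega) (by omega)]; rfl
      rw [hone]
      have hz : ∀ b ∈ (0 :: bs), 0 ≤ b := by
        intro b hb
        rcases List.mem_cons.1 hb with rfl | hb
        · omega
        · exact hbs _ hb
      have hshift : mkOut (x :: y :: r) ((0 :: b1 :: bs').map (· + 1)) = mkOut (y :: r) (0 :: b1 :: bs') := by
        rw [← hbsc]
        simpa using mkOut_shift x (y :: r) (0 :: bs) hz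
      simp only [List.map_cons] at hshift
      norm_num at hshift ⊢
      rw [hshift, mkOut_cons]

-- ===== VERDICT (by name: the statement is the Claim_ definition above) =====
theorem cluster_spec : Claim_equal_cluster := by
  intro l cs _ hpre
  unfold Spec_cluster
  cases l with
  | nil => exact absurd rfl hpre
  | cons x rest => rw [cluster_eq_ref, cluster_alt_eq_ref]
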